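-- pv_equiv track=rewrite | github.com/pypi-data/pypi-mirror-360 | packages/persian-jalali-calendar/persian_jalali_calendar-1.0.1-py3-none-any.whl/jalali_calendar/converter.py | jdn_to_jalali
-- ===== SOURCE A (Python) =====
-- def is_jalali_leap(year: int) -> bool:
--     """
--     Checks if a given Jalali year is a leap year based on the 33-year cycle.
--     A Jalali year is a leap year if (year % 33) is in a specific set of numbers.
--     """
--     leap_remainders = {1, 5, 9, 13, 17, 22, 26, 30}
--     return (year % 33) in leap_remainders
--
-- JALALI_EPOCH_JDN = 1948320
--
-- def jdn_to_jalali(jdn: int) -> tuple[int, int, int]: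
--     """Converts a Julian Day Number to its Jalali date."""
--     days_since_epoch = jdn - JALALI_EPOCH_JDN
--
--     num_33_year_cycles = days_since_epoch // 12053
--     jy = num_33_year_cycles * 33 + 1
--     days_since_epoch %= 12053
--
--     while True:
--         days_in_year = 366 if is_jalali_leap(jy) else 365
--         if days_since_epoch < days_in_year:
--             break
--         days_since_epoch -= days_in_year
--         jy += 1
--
--     day_of_year = days_since_epoch + 1
--
--     if day_of_year <= 186:
--         jm = (day_of_year - 1) // 31 + 1
--         jd = (day_of_year - 1) % 31 + 1
--     else:
--         remaining_days = day_of_year - 186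
--         jm = (remaining_days - 1) // 30 + 7
--         jd = (remaining_days - 1) % 30 + 1
--
--     return jy, jm, jd
-- ===== SOURCE B (Python) =====
-- JALALI_EPOCH_JDN = 1948320
--
-- # Cumulative days before each year-slot of one 33-year cycle (slot i = year jy_base + i;
-- # slot i has 366 days iff i in {0,4,8,12,16,21,25,29}, else 365).
-- _CUM = [0, 366, 731, 1096, 1461, 1827, 2192, 2557, 2922, 3288, 3653, 4018,
--         4383, 4749, 5114, 5479, 5844, 6210, 6575, 6940, 7305, 7670, 8036,
--         8401, 8766, 9131, 9497, 9862, 10227, 10592, 10958, 11323, 11688, 12053]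
--
-- def jdn_to_jalali(jdn: int) -> tuple[int, int, int]:
--     """Converts a Julian Day Number to its Jalali date (table + binary search)."""
--     days = jdn - JALALI_EPOCH_JDN
--     cycles = days // 12053
--     r = days % 12053
--     lo, hi = 0, 33
--     while hi - lo > 1:
--         mid = (lo + hi) // 2
--         if _CUM[mid] <= r:
--             lo = mid
--         else:
--             hi = mid
--     jy = cycles * 33 + 1 + lo
--     day_of_year = r - _CUM[lo] + 1
--     if day_of_year <= 186:
--         jm = (day_of_year - 1) // 31 + 1
--         jd = (day_of_year - 1) % 31 + 1
--     else:
--         remaining_days = day_of_year - 186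
--         jm = (remaining_days - 1) // 30 + 7
--         jd = (remaining_days - 1) % 30 + 1
--     return jy, jm, jd
-- ===== Notes on version B (the rewrite author's own statement) =====
-- stated objective: alternative
-- what changed: Replaces A's year-by-year subtraction loop (recomputing is_jalali_leap each iteration) with a precomputed cumulative-days prefix table over the 33-year cycle and a binary search for the year slot.
import Mathlib
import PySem

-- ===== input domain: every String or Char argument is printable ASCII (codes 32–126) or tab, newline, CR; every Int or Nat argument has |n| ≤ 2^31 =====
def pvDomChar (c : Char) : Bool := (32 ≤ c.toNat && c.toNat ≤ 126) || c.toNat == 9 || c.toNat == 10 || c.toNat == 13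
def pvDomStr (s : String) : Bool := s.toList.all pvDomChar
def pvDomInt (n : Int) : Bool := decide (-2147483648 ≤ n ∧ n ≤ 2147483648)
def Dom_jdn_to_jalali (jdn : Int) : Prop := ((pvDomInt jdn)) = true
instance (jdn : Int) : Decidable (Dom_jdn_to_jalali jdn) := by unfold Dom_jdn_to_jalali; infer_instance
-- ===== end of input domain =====

-- B replaces A's year-by-year subtraction loop by a precomputed cumulative-days table
-- over one 33-year cycle plus a hand-written binary search (objective: alternative/simpler).

-- ===== PORT A =====
def is_jalali_leap (year : Int) : Bool :=
  ([1, 5, 9, 13, 17, 22, 26, 30] : List Int).contains (PySem.Int.mod year 33)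

-- A's `while True` loop over (days_since_epoch, jy)
def jalaliLoop (r jy : Int) : Int × Int :=
  let days_in_year : Int := if is_jalali_leap jy then 366 else 365
  if r < days_in_year then (r, jy)
  else jalaliLoop (r - days_in_year) (jy + 1)
termination_by r.toNat
decreasing_by
  all_goals
    rename_i h
    simp only [days_in_year] at h
    split at h <;> split <;> omega

def jdn_to_jalali (jdn : Int) : Int × Int × Int :=
  let days_since_epoch := jdn - 1948320
  let num_33_year_cycles := PySem.Int.floordiv days_since_epoch 12053
  let jy0 := num_33_year_cycles * 33 + 1
  let r0 := PySem.Int.mod days_since_epoch 12053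
  let p := jalaliLoop r0 jy0
  let jy := p.2
  let day_of_year := p.1 + 1
  if day_of_year ≤ 186 then
    (jy, PySem.Int.floordiv (day_of_year - 1) 31 + 1, PySem.Int.mod (day_of_year - 1) 31 + 1)
  else
    let remaining_days := day_of_year - 186
    (jy, PySem.Int.floordiv (remaining_days - 1) 30 + 7, PySem.Int.mod (remaining_days - 1) 30 + 1)

-- ===== PORT B =====
def CUM : List Int :=
  [0, 366, 731, 1096, 1461, 1827, 2192, 2557, 2922, 3288, 3653, 4018,
   4383, 4749, 5114, 5479, 5844, 6210, 6575, 6940, 7305, 7670, 8036,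
   8401, 8766, 9131, 9497, 9862, 10227, 10592, 10958, 11323, 11688, 12053]

-- _CUM[i]; every index Source B uses is provably in range 0..33, so the `getD 0` default never fires
def cumAt (i : Int) : Int := (PySem.List.pyGet? CUM i).getD 0

-- Source B's `while hi - lo > 1` binary-search loop, returning the final lo
def bsearch (lo hi r : Int) : Int :=
  if 1 < hi - lo then
    let mid := PySem.Int.floordiv (lo + hi) 2
    if cumAt mid ≤ r then bsearch mid hi r else bsearch lo mid r
  else lo
termination_by (hi - lo).toNat
decreasing_by
  all_goals
    rw [PySem.Int.floordiv_eq_ediv_of_pos (by norm_num)]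
    omega

def jdn_to_jalali_alt (jdn : Int) : Int × Int × Int :=
  let days := jdn - 1948320
  let cycles := PySem.Int.floordiv days 12053
  let r := PySem.Int.mod days 12053
  let lo := bsearch 0 33 r
  let jy := cycles * 33 + 1 + lo
  let day_of_year := r - cumAt lo + 1
  if day_of_year ≤ 186 then
    (jy, PySem.Int.floordiv (day_of_year - 1) 31 + 1, PySem.Int.mod (day_of_year - 1) 31 + 1)
  else
    let remaining_days := day_of_year - 186
    (jy, PySem.Int.floordiv (remaining_days - 1) 30 + 7, PySem.Int.mod (remaining_days - 1) 30 + 1)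

-- ===== PRECONDITION & SPEC =====
def Spec_jdn_to_jalali (jdn : Int) (out : Int × Int × Int) : Prop := out = jdn_to_jalali_alt jdn
instance (jdn : Int) (out : Int × Int × Int) : Decidable (Spec_jdn_to_jalali jdn out) := by unfold Spec_jdn_to_jalali; infer_instance

-- ===== CLAIM (what is proved, stated in full; the proofs are below) =====
def Claim_equal_jdn_to_jalali : Prop := ∀ (jdn : Int), Dom_jdn_to_jalali jdn → Spec_jdn_to_jalali jdn (jdn_to_jalali jdn)

-- ===== LEMMAS AND PROOFS =====

lemma jalaliLoop_eq (r jy : Int) : jalaliLoop r jy =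
    (if r < (if is_jalali_leap jy then (366 : Int) else 365) then (r, jy)
     else jalaliLoop (r - (if is_jalali_leap jy then (366 : Int) else 365)) (jy + 1)) := by
  rw [jalaliLoop]

lemma bsearch_eq (lo hi r : Int) : bsearch lo hi r =
    (if 1 < hi - lo then
       (if cumAt (PySem.Int.floordiv (lo + hi) 2) ≤ r then
          bsearch (PySem.Int.floordiv (lo + hi) 2) hi r
        else bsearch lo (PySem.Int.floordiv (lo + hi) 2) r)
     else lo) := by
  rw [bsearch]

lemma cum_mono_nat : ∀ a : Nat, a < 34 → ∀ b : Nat, b < 34 → a < b → cumAt a < cumAt b := by decide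

lemma cum_mono {a b : Int} (ha : 0 ≤ a) (hab : a < b) (hb : b ≤ 33) : cumAt a < cumAt b := by
  have h := cum_mono_nat a.toNat (by omega) b.toNat (by omega) (by omega)
  rwa [Int.toNat_of_nonneg ha, Int.toNat_of_nonneg (by omega)] at h

lemma cum_mono_le {a b : Int} (ha : 0 ≤ a) (hab : a ≤ b) (hb : b ≤ 33) : cumAt a ≤ cumAt b := by
  rcases eq_or_lt_of_le hab with h | h
  · exact le_of_eq (by rw [h])
  · exact le_of_lt (cum_mono ha h hb)

lemma cum_uniq {a b r : Int} (ha0 : 0 ≤ a) (ha : a ≤ 32) (hb0 : 0 ≤ b) (hb : b ≤ 32)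
    (h1 : cumAt a ≤ r) (h2 : r < cumAt (a + 1)) (h3 : cumAt b ≤ r) (h4 : r < cumAt (b + 1)) :
    a = b := by
  rcases lt_trichotomy a b with h | h | h
  · have := cum_mono_le (a := a + 1) (b := b) (by omega) (by omega) (by omega)
    omega
  · exact h
  · have := cum_mono_le (a := b + 1) (b := a) (by omega) (by omega) (by omega)
    omega

lemma leap_step_nat : ∀ n : Nat, n < 33 →
    (if ([1, 5, 9, 13, 17, 22, 26, 30] : List Int).contains ((((1 + n) % 33 : Nat)) : Int)
      then (366 : Int) else 365) = cumAt ↑(n + 1) - cumAt ↑n := by decide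

-- A's `days_in_year` at year c*33+1+i equals the table increment CUM[i+1]-CUM[i]
lemma leap_step (c i : Int) (h0 : 0 ≤ i) (h1 : i ≤ 32) :
    (if is_jalali_leap (c * 33 + 1 + i) then (366 : Int) else 365) = cumAt (i + 1) - cumAt i := by
  obtain ⟨n, rfl⟩ : ∃ n : Nat, i = (n : Int) := ⟨i.toNat, (Int.toNat_of_nonneg h0).symm⟩
  have hn : n < 33 := by omega
  have hmod : PySem.Int.mod (c * 33 + 1 + (n : Int)) 33 = (((1 + n) % 33 : Nat) : Int) := by
    rw [PySem.Int.mod_eq_emod_of_pos (by norm_num)]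
    have : c * 33 + 1 + (n : Int) = (1 + (n : Int)) + 33 * c := by ring
    rw [this, Int.add_mul_emod_self_left]
    push_cast
    omega
  have := leap_step_nat n hn
  rw [is_jalali_leap, hmod]
  rw [show ((n : Int) + 1) = ((n + 1 : Nat) : Int) by push_cast; ring]
  exact this

lemma cum_zero : cumAt 0 = 0 := by decide
lemma cum_33 : cumAt 33 = 12053 := by decide

lemma loop_ex : ∀ (k : Nat) (i c r : Int), 0 ≤ i → i + k = 33 → cumAt i ≤ r → r < 12053 →
    ∃ j : Int, i ≤ j ∧ j ≤ 32 ∧ cumAt j ≤ r ∧ r < cumAt (j + 1) ∧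
      jalaliLoop (r - cumAt i) (c * 33 + 1 + i) = (r - cumAt j, c * 33 + 1 + j) := by
  intro k
  induction k with
  | zero =>
    intro i c r h0 hk hc hr
    have : i = 33 := by omega
    subst this
    rw [cum_33] at hc
    omega
  | succ k ih =>
    intro i c r h0 hk hc hr
    have hi32 : i ≤ 32 := by omega
    have hstep := leap_step c i h0 hi32
    rw [jalaliLoop_eq]
    rw [hstep]
    by_cases hlt : r - cumAt i < cumAt (i + 1) - cumAt i
    · rw [if_pos hlt]
      exact ⟨i, le_refl i, hi32, hc, by omega, rfl⟩
    · rw [if_neg hlt]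
      have h1 : cumAt (i + 1) ≤ r := by omega
      have h2 : r - cumAt i - (cumAt (i + 1) - cumAt i) = r - cumAt (i + 1) := by ring
      have h3 : c * 33 + 1 + i + 1 = c * 33 + 1 + (i + 1) := by ring
      rw [h2, h3]
      obtain ⟨j, hj1, hj2, hj3, hj4, hj5⟩ := ih (i + 1) c r (by omega) (by omega) h1 hr
      exact ⟨j, by omega, hj2, hj3, hj4, hj5⟩

lemma bs_ex : ∀ (k : Nat) (lo hi r : Int), (hi - lo).toNat ≤ k → 0 ≤ lo → lo < hi → hi ≤ 33 →
    cumAt lo ≤ r → r < cumAt hi →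
    ∃ j : Int, 0 ≤ j ∧ j ≤ 32 ∧ cumAt j ≤ r ∧ r < cumAt (j + 1) ∧ bsearch lo hi r = j := by
  intro k
  induction k with
  | zero => intro lo hi r hm _ hlt _ _ _; omega
  | succ k ih =>
    intro lo hi r hm h0 hlt h33 hc hr
    rw [bsearch_eq]
    by_cases hgap : 1 < hi - lo
    · rw [if_pos hgap]
      have hmid : PySem.Int.floordiv (lo + hi) 2 = (lo + hi) / 2 :=
        PySem.Int.floordiv_eq_ediv_of_pos (by norm_num)
      have hb1 : lo < PySem.Int.floordiv (lo + hi) 2 := by rw [hmid]; omega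
      have hb2 : PySem.Int.floordiv (lo + hi) 2 < hi := by rw [hmid]; omega
      by_cases hcm : cumAt (PySem.Int.floordiv (lo + hi) 2) ≤ r
      · rw [if_pos hcm]
        exact ih _ hi r (by omega) (by omega) hb2 h33 hcm hr
      · rw [if_neg hcm]
        exact ih lo _ r (by omega) h0 hb1 (by omega) hc (by omega)
    · rw [if_neg hgap]
      have : hi = lo + 1 := by omega
      subst this
      exact ⟨lo, h0, by omega, hc, hr, rfl⟩

-- ===== VERDICT (by name: the statement is the Claim_ definition above) =====
theorem jdn_to_jalali_spec : Claim_equal_jdn_to_jalali := by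
  intro jdn _
  unfold Spec_jdn_to_jalali
  have hr0 : 0 ≤ PySem.Int.mod (jdn - 1948320) 12053 :=
    PySem.Int.mod_nonneg (jdn - 1948320) (by norm_num)
  have hr1 : PySem.Int.mod (jdn - 1948320) 12053 < 12053 :=
    PySem.Int.mod_lt (jdn - 1948320) (by norm_num)
  obtain ⟨j, hj0, hj32, hjc, hjc', hjloop⟩ :=
    loop_ex 33 0 (PySem.Int.floordiv (jdn - 1948320) 12053) (PySem.Int.mod (jdn - 1948320) 12053)
      (by omega) (by omega) (by rw [cum_zero]; exact hr0) hr1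
  rw [cum_zero, sub_zero, add_zero] at hjloop
  obtain ⟨j', hj'0, hj'32, hj'c, hj'c', hbs⟩ :=
    bs_ex 33 0 33 (PySem.Int.mod (jdn - 1948320) 12053) (by omega) (by omega) (by omega)
      (by omega) (by rw [cum_zero]; exact hr0) (by rw [cum_33]; exact hr1)
  have hjj : j = j' := cum_uniq hj0 hj32 hj'0 hj'32 hjc hjc' hj'c hj'c'
  simp only [jdn_to_jalali, jdn_to_jalali_alt, hjloop, hbs, hjj]
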